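-- pv_equiv track=rewrite | github.com/ShimYC/prepare_test | z.py | dividing
-- ===== SOURCE A (Python) =====
-- def dividing(r,c,x1,x2,y1,y2,st,cnt):
--     if x1==x2:
--         return st-1
--     xmid=(x1+x2)//2
--     ymid=(y1+y2)//2
--     #1st
--     if xmid>=r and ymid>=c:
--         st=dividing(r,c,x1,    xmid,    y1,     ymid,    st,          cnt//4)
--     #2nd
--     elif xmid>=r and ymid<c:
--         st=dividing(r,c,x1,    xmid,    ymid+1,  y2,     st+cnt//4,   cnt//4)
--     #3rd
--     elif xmid<r and ymid>=c:
--         st=dividing(r,c,xmid+1, x2,     y1,     ymid,    st+2*cnt//4, cnt//4)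
--     #4th
--     else:
--         st=dividing(r,c,xmid+1, x2,     ymid+1,  y2,     st+3*cnt//4, cnt//4)
--     return st
-- ===== SOURCE B (Python) =====
-- def dividing(r, c, x1, x2, y1, y2, st, cnt):
--     while x1 != x2:
--         xmid = (x1 + x2) // 2
--         ymid = (y1 + y2) // 2
--         q = (2 if xmid < r else 0) + (1 if ymid < c else 0)
--         st += q * cnt // 4
--         x1, x2 = (x1, xmid) if xmid >= r else (xmid + 1, x2)
--         y1, y2 = (y1, ymid) if ymid >= c else (ymid + 1, y2)
--         cnt //= 4
--     return st - 1
-- ===== Notes on version B (the rewrite author's own statement) =====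
-- stated objective: simpler
-- what changed: Replaces the four-branch tail recursion by a while loop that computes the quadrant number q arithmetically, adds q*cnt//4 once, and updates the x- and y-bounds independently.
import Mathlib
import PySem

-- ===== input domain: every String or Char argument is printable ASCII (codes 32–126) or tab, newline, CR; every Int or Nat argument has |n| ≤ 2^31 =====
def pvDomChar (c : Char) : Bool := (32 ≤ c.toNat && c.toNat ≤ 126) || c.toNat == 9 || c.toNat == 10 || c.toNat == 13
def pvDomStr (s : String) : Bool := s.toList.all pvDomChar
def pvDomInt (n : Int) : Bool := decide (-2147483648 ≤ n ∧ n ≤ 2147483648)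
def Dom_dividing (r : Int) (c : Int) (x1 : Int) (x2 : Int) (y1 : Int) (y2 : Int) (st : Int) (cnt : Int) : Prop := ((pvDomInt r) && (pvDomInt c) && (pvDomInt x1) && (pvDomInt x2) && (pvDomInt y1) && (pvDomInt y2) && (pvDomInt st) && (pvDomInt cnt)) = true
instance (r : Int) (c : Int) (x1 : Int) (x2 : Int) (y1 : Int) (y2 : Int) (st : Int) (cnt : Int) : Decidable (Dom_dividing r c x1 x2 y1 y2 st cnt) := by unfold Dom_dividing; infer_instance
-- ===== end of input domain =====

-- B replaces A's four-branch recursion by a while loop that computes the quadrant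
-- number q and adds q*cnt//4 once, updating the x- and y-bounds independently
-- (objective: simpler). Equivalence is proved on Pre_ (x1 ≤ x2); Python A diverges
-- when x1 > x2.

-- midpoint bounds, cited by the ports' decreasing_by
theorem pv_mid_ge (x1 x2 : Int) (h : x1 ≤ x2) : x1 ≤ PySem.Int.floordiv (x1 + x2) 2 :=
  (PySem.Int.floordiv_two_mid_bounds h).1

theorem pv_mid_lt (x1 x2 : Int) (h : x1 < x2) : PySem.Int.floordiv (x1 + x2) 2 < x2 := by
  rw [PySem.Int.floordiv_lt_iff_lt_mul (by omega)]; omega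

-- ===== PORT A =====
-- literal transliteration of A's recursion; the final 'else st - 1' is a totality
-- guard for x1 > x2, where the Python recursion never terminates (outside Pre_)
def dividing (r : Int) (c : Int) (x1 : Int) (x2 : Int) (y1 : Int) (y2 : Int) (st : Int) (cnt : Int) : Int :=
  if x1 = x2 then st - 1
  else if hlt : x1 < x2 then
    let xmid := PySem.Int.floordiv (x1 + x2) 2
    let ymid := PySem.Int.floordiv (y1 + y2) 2
    if xmid ≥ r ∧ ymid ≥ c then
      dividing r c x1 xmid y1 ymid st (PySem.Int.floordiv cnt 4)
    else if xmid ≥ r ∧ ymid < c then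
      dividing r c x1 xmid (ymid + 1) y2 (st + PySem.Int.floordiv cnt 4) (PySem.Int.floordiv cnt 4)
    else if xmid < r ∧ ymid ≥ c then
      dividing r c (xmid + 1) x2 y1 ymid (st + PySem.Int.floordiv (2 * cnt) 4) (PySem.Int.floordiv cnt 4)
    else
      dividing r c (xmid + 1) x2 (ymid + 1) y2 (st + PySem.Int.floordiv (3 * cnt) 4) (PySem.Int.floordiv cnt 4)
  else st - 1
termination_by (x2 - x1).toNat
decreasing_by
  all_goals
    have h1 := pv_mid_ge x1 x2 (le_of_lt hlt)
    have h2 := pv_mid_lt x1 x2 hlt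
    omega

-- ===== PORT B =====
-- the while loop of Source B as a tail-recursive helper over the loop state;
-- the 'else st - 1' totality guard covers x1 > x2 (Python loops forever, outside Pre_)
def divLoop (r : Int) (c : Int) (x1 : Int) (x2 : Int) (y1 : Int) (y2 : Int) (st : Int) (cnt : Int) : Int :=
  if x1 ≠ x2 then
    if hlt : x1 < x2 then
      let xmid := PySem.Int.floordiv (x1 + x2) 2
      let ymid := PySem.Int.floordiv (y1 + y2) 2
      let q : Int := (if xmid < r then 2 else 0) + (if ymid < c then 1 else 0)
      divLoop r c
        (if xmid ≥ r then x1 else xmid + 1) (if xmid ≥ r then xmid else x2)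
        (if ymid ≥ c then y1 else ymid + 1) (if ymid ≥ c then ymid else y2)
        (st + PySem.Int.floordiv (q * cnt) 4) (PySem.Int.floordiv cnt 4)
    else st - 1
  else st - 1
termination_by (x2 - x1).toNat
decreasing_by
  have h1 := pv_mid_ge x1 x2 (le_of_lt hlt)
  have h2 := pv_mid_lt x1 x2 hlt
  split <;> omega

def dividing_alt (r : Int) (c : Int) (x1 : Int) (x2 : Int) (y1 : Int) (y2 : Int) (st : Int) (cnt : Int) : Int :=
  divLoop r c x1 x2 y1 y2 st cnt

-- ===== PRECONDITION & SPEC =====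
-- Pre_: x1 ≤ x2; when x1 > x2 the Python A recurses forever (no value is returned)
def Pre_dividing (r : Int) (c : Int) (x1 : Int) (x2 : Int) (y1 : Int) (y2 : Int) (st : Int) (cnt : Int) : Prop := x1 ≤ x2
instance (r : Int) (c : Int) (x1 : Int) (x2 : Int) (y1 : Int) (y2 : Int) (st : Int) (cnt : Int) : Decidable (Pre_dividing r c x1 x2 y1 y2 st cnt) := by unfold Pre_dividing; infer_instance

def pvWitness_dividing : Int × Int × Int × Int × Int × Int × Int × Int := (2, 3, 0, 3, 0, 3, 1, 16)

def Spec_dividing (r : Int) (c : Int) (x1 : Int) (x2 : Int) (y1 : Int) (y2 : Int) (st : Int) (cnt : Int) (out : Int) : Prop := out = dividing_alt r c x1 x2 y1 y2 st cnt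
instance (r : Int) (c : Int) (x1 : Int) (x2 : Int) (y1 : Int) (y2 : Int) (st : Int) (cnt : Int) (out : Int) : Decidable (Spec_dividing r c x1 x2 y1 y2 st cnt out) := by unfold Spec_dividing; infer_instance

-- ===== CLAIM (what is proved, stated in full; the proofs are below) =====
def Claim_equal_dividing : Prop := ∀ (r : Int) (c : Int) (x1 : Int) (x2 : Int) (y1 : Int) (y2 : Int) (st : Int) (cnt : Int), Dom_dividing r c x1 x2 y1 y2 st cnt → Pre_dividing r c x1 x2 y1 y2 st cnt → Spec_dividing r c x1 x2 y1 y2 st cnt (dividing r c x1 x2 y1 y2 st cnt)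

-- ===== LEMMAS AND PROOFS =====

theorem dividing_eq_divLoop (r c : Int) : ∀ (n : Nat) (x1 x2 y1 y2 st cnt : Int),
    (x2 - x1).toNat = n → x1 ≤ x2 →
    dividing r c x1 x2 y1 y2 st cnt = divLoop r c x1 x2 y1 y2 st cnt := by
  intro n
  induction n using Nat.strong_induction_on with
  | _ n ih =>
    intro x1 x2 y1 y2 st cnt hn hle
    rw [dividing, divLoop]
    by_cases heq : x1 = x2
    · simp [heq]
    · have hlt : x1 < x2 := lt_of_le_of_ne hle heq
      have h1 := pv_mid_ge x1 x2 hle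
      have h2 := pv_mid_lt x1 x2 hlt
      simp only [heq, if_false, ne_eq, not_false_iff, if_true, dif_pos hlt]
      set xmid := PySem.Int.floordiv (x1 + x2) 2 with hx
      set ymid := PySem.Int.floordiv (y1 + y2) 2 with hy
      by_cases hr : xmid ≥ r <;> by_cases hc : ymid ≥ c
      · -- quadrant 0
        simp only [hr, hc, and_self, if_true, if_pos hr, if_pos hc, not_lt.mpr hr, not_lt.mpr hc,
          if_false, zero_add, zero_mul, PySem.Int.floordiv, Int.zero_fdiv, add_zero]
        exact ih _ (by omega) x1 xmid y1 ymid st _ rfl (by omega)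
      · -- quadrant 1
        have hc' : ymid < c := by omega
        simp only [hr, hc, hc', and_true, and_false, if_false, if_true, if_pos hr,
          not_lt.mpr hr, if_neg (not_le.mpr hc'), zero_add, one_mul]
        exact ih _ (by omega) x1 xmid (ymid + 1) y2 _ _ rfl (by omega)
      · -- quadrant 2
        have hr' : xmid < r := by omega
        simp only [hr, hc, hr', and_true, and_false, false_and, if_false, if_true,
          if_neg (not_le.mpr hr'), if_pos hc, not_lt.mpr hc, add_zero]
        exact ih _ (by omega) (xmid + 1) x2 y1 ymid _ _ rfl (by omega)
      · -- quadrant 3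
        have hr' : xmid < r := by omega
        have hc' : ymid < c := by omega
        simp only [hr, hc, hr', hc', and_false, false_and, if_false,
          if_neg (not_le.mpr hr'), if_neg (not_le.mpr hc')]
        norm_num
        exact ih _ (by omega) (xmid + 1) x2 (ymid + 1) y2 _ _ rfl (by omega)

-- ===== VERDICT (by name: the statement is the Claim_ definition above) =====
theorem dividing_spec : Claim_equal_dividing := by
  intro r c x1 x2 y1 y2 st cnt _ hpre
  unfold Spec_dividing dividing_alt
  exact dividing_eq_divLoop r c (x2 - x1).toNat x1 x2 y1 y2 st cnt rfl hpre
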